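-- pv_equiv track=rewrite | github.com/mabo1215/BodhiPromptShield | src/algorithms/gdifsea.py | independent_support
-- ===== SOURCE A (Python) =====
-- from typing import List, Set, Tuple
--
-- def independent_support(
--     alpha: str, strings: List[str], frequent_closed: Set[str]
-- ) -> int:
--     """
--     Independent support of substring α in S under limit F (frequent closed set).
--     Count matches of α that are not contained in a longer frequent closed substring.
--     """
--     count = 0
--     for s in strings:
--         idx = 0
--         while True:
--             pos = s.find(alpha, idx)
--             if pos == -1:
--                 break
--             # Check independence: no γ in F with α ⊂ γ containing this occurrence
--             independent = True
--             for fc in frequent_closed: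
--                 if len(fc) > len(alpha) and alpha in fc and s.find(fc, pos) == pos:
--                     independent = False
--                     break
--             if independent:
--                 count += 1
--             idx = pos + 1
--     return count
-- ===== SOURCE B (Python) =====
-- def independent_support(alpha, strings, frequent_closed):
--     # Filter the candidate blockers once (A re-tests every fc for every occurrence),
--     # then per string mark every position where a candidate starts and count the
--     # unblocked occurrences of alpha in a single scan.
--     cands = [fc for fc in frequent_closed if len(fc) > len(alpha) and alpha in fc]
--     total = 0
--     for s in strings:
--         blocked = {i for c in cands
--                    for i in range(len(s) + 1 - len(c)) if s.startswith(c, i)}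
--         total += sum(1 for i in range(len(s) + 1 - len(alpha))
--                      if s.startswith(alpha, i) and i not in blocked)
--     return total
-- ===== Notes on version B (the rewrite author's own statement) =====
-- stated objective: alternative
-- what changed: B filters the blocking candidates out of frequent_closed once, then per string precomputes the set of all positions where some candidate starts and counts the unblocked occurrences of alpha in a single position scan, instead of A's find-loop that rescans all of frequent_closed (re-testing length and substring containment) at every occurrence.
import Mathlib
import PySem

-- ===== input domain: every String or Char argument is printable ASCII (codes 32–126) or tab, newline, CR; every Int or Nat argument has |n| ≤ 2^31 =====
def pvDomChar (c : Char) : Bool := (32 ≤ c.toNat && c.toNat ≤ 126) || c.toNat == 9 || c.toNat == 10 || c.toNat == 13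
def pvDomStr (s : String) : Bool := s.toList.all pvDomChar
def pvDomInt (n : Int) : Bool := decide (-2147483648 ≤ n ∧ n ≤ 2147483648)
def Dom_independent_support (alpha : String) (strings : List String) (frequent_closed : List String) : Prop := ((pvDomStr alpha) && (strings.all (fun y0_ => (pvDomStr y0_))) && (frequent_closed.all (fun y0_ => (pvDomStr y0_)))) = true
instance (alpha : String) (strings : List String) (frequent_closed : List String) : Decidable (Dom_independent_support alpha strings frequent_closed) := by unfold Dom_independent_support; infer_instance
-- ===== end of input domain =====

-- B filters the candidate blockers once and marks each string's blocked start positions in a set,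
-- instead of rescanning all of frequent_closed at every occurrence (objective: alternative).

-- ===== PORT A =====
-- inner `for fc in frequent_closed: ... break` loop: the `independent` flag for the
-- occurrence at position `pos` (iteration order of the Python set does not affect the flag)
def pvCheckA (s alphaL : List Char) (pos : Nat) : List (List Char) → Bool
  | [] => true
  | fc :: rest =>
    if alphaL.length < fc.length ∧ PySem.Chars.isIn alphaL fc = true
        ∧ PySem.Chars.findFrom s fc (pos : Int) = (pos : Int)
    then false
    else pvCheckA s alphaL pos rest

-- used by the port's termination proof (pvLoopA cites it by name)
theorem pvFindFrom_of_gt (s sub : List Char) (k : Nat) (h : s.length < k) :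
    PySem.Chars.findFrom s sub (k : Int) = -1 := by
  simp only [PySem.Chars.findFrom]
  split_ifs <;> omega

theorem pvFindFrom_bounds (s sub : List Char) (k : Nat)
    (h : PySem.Chars.findFrom s sub (k : Int) ≠ -1) :
    (k : Int) ≤ PySem.Chars.findFrom s sub (k : Int) ∧
      PySem.Chars.findFrom s sub (k : Int) ≤ (s.length : Int) := by
  by_cases hk : k ≤ s.length
  · refine ⟨(PySem.Chars.findFrom_natCast_spec s sub k hk h).1, ?_⟩
    have hle := PySem.Chars.find_le_length (List.drop k s) sub
    have hld : (List.drop k s).length = s.length - k := List.length_drop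
    rw [hld] at hle
    rw [PySem.Chars.findFrom_natCast s sub k hk]
    by_cases hf : PySem.Chars.find (List.drop k s) sub = -1
    · rw [if_pos hf]; omega
    · rw [if_neg hf]; omega
  · exact absurd (pvFindFrom_of_gt s sub k (by omega)) h

-- `while True: pos = s.find(alpha, idx); if pos == -1: break; ...; idx = pos + 1`
def pvLoopA (alphaL : List Char) (F : List (List Char)) (s : List Char)
    (idx : Nat) (count : Int) : Int :=
  let pos := PySem.Chars.findFrom s alphaL (idx : Int)
  if h : pos = -1 then count
  else pvLoopA alphaL F s (pos.toNat + 1)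
        (if pvCheckA s alphaL pos.toNat F then count + 1 else count)
termination_by s.length + 1 - idx
decreasing_by
  have := pvFindFrom_bounds s alphaL idx h
  omega

def independent_support (alpha : String) (strings : List String) (frequent_closed : List String) : Int :=
  strings.foldl
    (fun count s => pvLoopA alpha.toList (frequent_closed.map String.toList) s.toList 0 count) 0

-- ===== PORT B =====
-- `s.startswith(p, i)` for 0 ≤ i is exactly `p <+: s[i:]`, ported as startswith on List.drop;
-- Python's `range(len(s) - len(c) + 1)` equals `List.range (s.length + 1 - c.length)`
-- (Nat subtraction yields the same empty range when c is longer than s).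
def independent_support_alt (alpha : String) (strings : List String) (frequent_closed : List String) : Int :=
  let aL := alpha.toList
  let cands := (frequent_closed.map String.toList).filter
      (fun fc => decide (aL.length < fc.length) && PySem.Chars.isIn aL fc)
  strings.foldl
    (fun total s =>
      let sL := s.toList
      let blocked : PySem.Set Nat := PySem.Set.ofList
        (cands.flatMap (fun c =>
          (List.range (sL.length + 1 - c.length)).filter
            (fun i => PySem.Chars.startswith (sL.drop i) c)))
      total + (((List.range (sL.length + 1 - aL.length)).filter
          (fun i => PySem.Chars.startswith (sL.drop i) aL && !(PySem.Set.contains blocked i))).length : Int))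
    0

-- ===== PRECONDITION & SPEC =====
def Spec_independent_support (alpha : String) (strings : List String) (frequent_closed : List String) (out : Int) : Prop := out = independent_support_alt alpha strings frequent_closed
instance (alpha : String) (strings : List String) (frequent_closed : List String) (out : Int) : Decidable (Spec_independent_support alpha strings frequent_closed out) := by unfold Spec_independent_support; infer_instance

-- ===== CLAIM (what is proved, stated in full; the proofs are below) =====
def Claim_equal_independent_support : Prop := ∀ (alpha : String) (strings : List String) (frequent_closed : List String), Dom_independent_support alpha strings frequent_closed → Spec_independent_support alpha strings frequent_closed (independent_support alpha strings frequent_closed)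

-- ===== LEMMAS AND PROOFS =====

-- `s.find(fc, pos) == pos` says exactly: fc starts at position pos
theorem pvFindFrom_eq_self_iff (s sub : List Char) (k : Nat) (hk : k ≤ s.length) :
    PySem.Chars.findFrom s sub (k : Int) = (k : Int) ↔ sub <+: s.drop k := by
  rw [PySem.Chars.findFrom_natCast s sub k hk]
  split_ifs with hf
  · constructor
    · intro h; exact h.elim
    · intro h
      rw [PySem.Chars.find_eq_neg_one_iff] at hf
      exact absurd h.isInfix hf
  · constructor
    · intro h
      have h0 : PySem.Chars.find (List.drop k s) sub = 0 := by omega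
      have := (PySem.Chars.find_spec (s := List.drop k s) (sub := sub) (by omega)).1
      rwa [h0] at this
    · intro h
      have hnn : 0 ≤ PySem.Chars.find (List.drop k s) sub :=
        (PySem.Chars.find_nonneg_iff _ _).2 h.isInfix
      have hspec := PySem.Chars.find_spec (s := List.drop k s) (sub := sub) hnn
      by_contra hne
      have hpos : 0 < (PySem.Chars.find (List.drop k s) sub).toNat := by omega
      exact hspec.2 0 hpos (by simpa using h)

-- the independence flag, characterised
theorem pvCheckA_iff (s alphaL : List Char) (pos : Nat) (F : List (List Char)) (hpos : pos ≤ s.length) :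
    pvCheckA s alphaL pos F = true ↔
      ∀ fc ∈ F, ¬ (alphaL.length < fc.length ∧ alphaL <:+: fc ∧ fc <+: s.drop pos) := by
  induction F with
  | nil => simp [pvCheckA]
  | cons g rest ih =>
    simp only [pvCheckA]
    split_ifs with hcond
    · refine iff_of_false (by simp) ?_
      intro hall
      exact hall g (List.mem_cons_self)
        ⟨hcond.1, (PySem.Chars.isIn_iff_infix _ _).1 hcond.2.1,
         (pvFindFrom_eq_self_iff s g pos hpos).1 hcond.2.2⟩
    · rw [ih]
      constructor
      · intro h fc' hfc'
        rcases List.mem_cons.1 hfc' with rfl | h'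
        · intro hc
          exact hcond ⟨hc.1, (PySem.Chars.isIn_iff_infix _ _).2 hc.2.1,
            (pvFindFrom_eq_self_iff s fc' pos hpos).2 hc.2.2⟩
        · exact h fc' h'
      · intro h fc' hfc'; exact h fc' (List.mem_cons_of_mem _ hfc')

-- counting helpers
theorem pvCountP_split (R : List Nat) (f : Nat → Bool) (p idx : Nat)
    (h : ∀ i ∈ R, f i = true → ((idx ≤ i) ↔ (i = p ∨ p + 1 ≤ i))) :
    R.countP (fun i => decide (idx ≤ i) && f i)
      = R.countP (fun i => decide (i = p) && f i) + R.countP (fun i => decide (p + 1 ≤ i) && f i) := by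
  induction R with
  | nil => simp
  | cons a R ih =>
    have hR := ih (fun i hi => h i (List.mem_cons_of_mem _ hi))
    simp only [List.countP_cons, hR]
    cases hf : f a with
    | false => simp
    | true =>
      have hiff := h a (List.mem_cons_self) hf
      simp only [Bool.and_true, decide_eq_true_eq]
      split_ifs <;> omega

theorem pvCountP_point (n p : Nat) (f : Nat → Bool) :
    (List.range n).countP (fun i => decide (i = p) && f i)
      = if p < n ∧ f p = true then 1 else 0 := by
  induction n with
  | zero => simp
  | succ n ih =>
    rw [List.range_succ, List.countP_append, ih]
    simp only [List.countP_cons, List.countP_nil, Nat.zero_add]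
    cases hf : f p with
    | false =>
      simp only [Bool.false_eq_true, and_false, if_false]
      by_cases hnp : n = p
      · subst hnp; simp [hf]
      · simp [hnp]
    | true =>
      simp only [and_true]
      by_cases hnp : n = p
      · subst hnp
        rw [if_neg (lt_irrefl n), if_pos (Nat.lt_succ_self n)]
        simp [hf]
      · have h2 : (decide (n = p) && f n) = false := by simp [hnp]
        rw [h2]
        simp only [Bool.false_eq_true, if_false]
        by_cases hpn : p < n
        · rw [if_pos hpn, if_pos (by omega)]
        · rw [if_neg hpn, if_neg (by omega)]

-- the per-string count both programs compute
def pvSpecCount (aL : List Char) (F : List (List Char)) (s : List Char) (idx : Nat) : Nat :=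
  (List.range (s.length + 1 - aL.length)).countP
    (fun i => decide (idx ≤ i) && PySem.Chars.startswith (s.drop i) aL && pvCheckA s aL i F)

theorem pvSpecCount_zero_of_none (aL : List Char) (F : List (List Char)) (s : List Char)
    (idx : Nat) (h : PySem.Chars.findFrom s aL (idx : Int) = -1) :
    pvSpecCount aL F s idx = 0 := by
  unfold pvSpecCount
  rw [List.countP_eq_zero]
  intro i hi
  simp only [List.mem_range] at hi
  simp only [Bool.and_eq_true, decide_eq_true_eq, not_and]
  rintro ⟨hidx, hsw⟩ _
  have hpre : aL <+: List.drop i s := (PySem.Chars.startswith_iff _ _).1 hsw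
  by_cases hk : idx ≤ s.length
  · rw [PySem.Chars.findFrom_natCast_eq_neg_one_iff s aL idx hk] at h
    apply h
    have : List.drop (i - idx) (List.drop idx s) = List.drop i s := by
      rw [List.drop_drop]; congr 1; omega
    exact (hpre.isInfix).trans (by rw [← this]; exact (List.drop_suffix _ _).isInfix)
  · omega

theorem pvLoopA_eq (aL : List Char) (F : List (List Char)) (s : List Char) :
    ∀ idx count, pvLoopA aL F s idx count = count + (pvSpecCount aL F s idx : Int) := by
  have H : ∀ n idx count, s.length + 1 - idx ≤ n →
      pvLoopA aL F s idx count = count + (pvSpecCount aL F s idx : Int) := by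
    intro n
    induction n with
    | zero =>
      intro idx count hn
      have hgt : s.length < idx := by omega
      rw [pvLoopA]
      rw [dif_pos (pvFindFrom_of_gt s aL idx hgt)]
      rw [pvSpecCount_zero_of_none aL F s idx (pvFindFrom_of_gt s aL idx hgt)]
      simp
    | succ n ih =>
      intro idx count hn
      rw [pvLoopA]
      by_cases h : PySem.Chars.findFrom s aL (idx : Int) = -1
      · rw [dif_pos h, pvSpecCount_zero_of_none aL F s idx h]; simp
      · rw [dif_neg h]
        have hb := pvFindFrom_bounds s aL idx h
        have hk : idx ≤ s.length := by
          by_contra hc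
          exact h (pvFindFrom_of_gt s aL idx (by omega))
        have hspec := PySem.Chars.findFrom_natCast_spec s aL idx hk h
        set p := (PySem.Chars.findFrom s aL (idx : Int)).toNat with hp
        have hip : idx ≤ p := by omega
        have hpl : p ≤ s.length := by omega
        have hpre : aL <+: List.drop p s := hspec.2.1
        have hmin : ∀ i, idx ≤ i → i < p → ¬ aL <+: List.drop i s := hspec.2.2
        rw [ih (p + 1) _ (by omega)]
        -- split the count at the first occurrence p
        have hsplit := pvCountP_split (List.range (s.length + 1 - aL.length))
          (fun i => PySem.Chars.startswith (s.drop i) aL && pvCheckA s aL i F) p idx ?_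
        · have hpoint := pvCountP_point (s.length + 1 - aL.length)
            p (fun i => PySem.Chars.startswith (s.drop i) aL && pvCheckA s aL i F)
          have hplen : aL.length ≤ s.length - p := by
            have := hpre.length_le
            simp only [List.length_drop] at this
            omega
          have hpn : p < s.length + 1 - aL.length := by omega
          have hswp : PySem.Chars.startswith (s.drop p) aL = true :=
            (PySem.Chars.startswith_iff _ _).2 hpre
          unfold pvSpecCount
          simp only [← Bool.and_assoc] at hsplit hpoint ⊢
          rw [hsplit, hpoint]
          simp only [hpn, hswp, true_and, Bool.true_and]
          by_cases hq : pvCheckA s aL p F = true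
          · rw [if_pos hq, if_pos hq]
            push_cast; ring
          · rw [if_neg hq, if_neg hq]
            push_cast; ring
        · intro i _ hfi
          simp only [Bool.and_eq_true] at hfi
          constructor
          · intro hidx
            by_cases hcase : i = p
            · exact Or.inl hcase
            · refine Or.inr ?_
              by_contra hlt
              exact hmin i hidx (by omega) ((PySem.Chars.startswith_iff _ _).1 hfi.1)
          · rintro (rfl | hge) <;> omega
  intro idx count
  exact H (s.length + 1 - idx) idx count le_rfl

-- membership in B's blocked set = existence of a blocking candidate starting at i
theorem pvBlocked_iff (aL : List Char) (F : List (List Char)) (s : List Char) (i : Nat) :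
    PySem.Set.contains (PySem.Set.ofList
        ((F.filter (fun fc => decide (aL.length < fc.length) && PySem.Chars.isIn aL fc)).flatMap
          (fun c => (List.range (s.length + 1 - c.length)).filter
            (fun j => PySem.Chars.startswith (s.drop j) c)))) i = true ↔
      ∃ fc ∈ F, aL.length < fc.length ∧ aL <:+: fc ∧ fc <+: s.drop i := by
  rw [PySem.Set.contains_iff, PySem.Set.mem_ofList]
  simp only [List.mem_flatMap, List.mem_filter, List.mem_range, Bool.and_eq_true,
    decide_eq_true_eq, PySem.Chars.isIn_iff_infix, PySem.Chars.startswith_iff]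
  constructor
  · rintro ⟨c, ⟨hcF, hlen, hin⟩, _, hsw⟩
    exact ⟨c, hcF, hlen, hin, hsw⟩
  · rintro ⟨fc, hcF, hlen, hin, hpre⟩
    refine ⟨fc, ⟨hcF, hlen, hin⟩, ?_, hpre⟩
    have h1 := hpre.length_le
    rw [List.length_drop] at h1
    omega

-- B's per-string count equals the specification count
theorem pvAltCount_eq (aL : List Char) (F : List (List Char)) (s : List Char) :
    ((List.range (s.length + 1 - aL.length)).filter
        (fun i => PySem.Chars.startswith (s.drop i) aL &&
          !(PySem.Set.contains (PySem.Set.ofList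
            ((F.filter (fun fc => decide (aL.length < fc.length) && PySem.Chars.isIn aL fc)).flatMap
              (fun c => (List.range (s.length + 1 - c.length)).filter
                (fun j => PySem.Chars.startswith (s.drop j) c)))) i))).length
      = pvSpecCount aL F s 0 := by
  unfold pvSpecCount
  rw [List.countP_eq_length_filter]
  congr 1
  apply List.filter_congr
  intro i hi
  have hil : i ≤ s.length := by
    rw [List.mem_range] at hi
    omega
  have h0 : decide (0 ≤ i) = true := by simp
  rw [h0, Bool.true_and]
  have hmain : (!(PySem.Set.contains (PySem.Set.ofList
      ((F.filter (fun fc => decide (aL.length < fc.length) && PySem.Chars.isIn aL fc)).flatMap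
        (fun c => (List.range (s.length + 1 - c.length)).filter
          (fun j => PySem.Chars.startswith (s.drop j) c)))) i)) = pvCheckA s aL i F := by
    rw [Bool.eq_iff_iff, Bool.not_eq_true', ← Bool.not_eq_true]
    rw [pvBlocked_iff aL F s i, pvCheckA_iff s aL i F hil]
    constructor
    · intro hno fc hfc hcond
      exact hno ⟨fc, hfc, hcond⟩
    · intro hall hex
      obtain ⟨fc, hfc, hcond⟩ := hex
      exact hall fc hfc hcond
  rw [hmain]

-- the two folds over `strings` agree
theorem pvFold_eq (aL : List Char) (F : List (List Char)) :
    ∀ (ss : List String) (acc : Int),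
      ss.foldl (fun count s => pvLoopA aL F s.toList 0 count) acc
        = ss.foldl (fun total s =>
            total + (((List.range (s.toList.length + 1 - aL.length)).filter
              (fun i => PySem.Chars.startswith (s.toList.drop i) aL &&
                !(PySem.Set.contains (PySem.Set.ofList
                  ((F.filter (fun fc => decide (aL.length < fc.length) && PySem.Chars.isIn aL fc)).flatMap
                    (fun c => (List.range (s.toList.length + 1 - c.length)).filter
                      (fun j => PySem.Chars.startswith (s.toList.drop j) c)))) i))).length : Int)) acc := by
  intro ss
  induction ss with
  | nil => intro acc; rfl
  | cons s ss ih =>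
    intro acc
    simp only [List.foldl_cons]
    rw [ih, pvLoopA_eq, pvAltCount_eq]

-- ===== VERDICT (by name: the statement is the Claim_ definition above) =====
theorem independent_support_spec : Claim_equal_independent_support := by
  intro alpha strings frequent_closed _
  unfold Spec_independent_support independent_support independent_support_alt
  exact pvFold_eq alpha.toList (frequent_closed.map String.toList) strings 0
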